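-- pv_equiv track=rewrite | github.com/RPP1011/extensive-sim-game | training/pretrain.py | _extract_ability_name
-- ===== SOURCE A (Python) =====
-- def _extract_ability_name(text: str) -> str | None:
--     """Extract ability/passive name from DSL text."""
--     for line in text.split("\n"):
--         line = line.strip()
--         if line.startswith("ability ") or line.startswith("passive "):
--             parts = line.split()
--             if len(parts) >= 2:
--                 return parts[1].rstrip("{").strip()
--     return None
-- ===== SOURCE B (Python) =====
-- def _extract_ability_name(text):
--     """Extract ability/passive name from DSL text.
--
--     Single pass over the raw text with index arithmetic: at each line start,
--     skip non-newline whitespace, test the keyword in place, and slice the name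
--     out directly -- no per-line list from split(), no strip() copies.
--     """
--     WS = " \t\r\x0b\x0c"  # whitespace except newline
--     i, n = 0, len(text)
--     while True:
--         # at a line start: skip non-newline whitespace
--         j = i
--         while j < n and text[j] in WS:
--             j += 1
--         if text.startswith("ability ", j) or text.startswith("passive ", j):
--             j += 8
--             while j < n and text[j] in WS:
--                 j += 1
--             k = j
--             while k < n and not text[k].isspace():
--                 k += 1
--             if k > j:
--                 return text[j:k].rstrip("{")
--         # advance to the start of the next line
--         nl = text.find("\n", i)
--         if nl == -1:
--             return None
--         i = nl + 1
-- ===== Notes on version B (the rewrite author's own statement) =====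
-- stated objective: alternative
-- what changed: B replaces A's split-into-lines / strip / word-split pipeline by a single index-based scan of the raw text: at each line start it skips non-newline whitespace in place, tests the keyword with startswith at that offset, slices the name out directly, and jumps past the next newline with str.find, allocating no per-line or per-word lists.
import Mathlib
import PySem

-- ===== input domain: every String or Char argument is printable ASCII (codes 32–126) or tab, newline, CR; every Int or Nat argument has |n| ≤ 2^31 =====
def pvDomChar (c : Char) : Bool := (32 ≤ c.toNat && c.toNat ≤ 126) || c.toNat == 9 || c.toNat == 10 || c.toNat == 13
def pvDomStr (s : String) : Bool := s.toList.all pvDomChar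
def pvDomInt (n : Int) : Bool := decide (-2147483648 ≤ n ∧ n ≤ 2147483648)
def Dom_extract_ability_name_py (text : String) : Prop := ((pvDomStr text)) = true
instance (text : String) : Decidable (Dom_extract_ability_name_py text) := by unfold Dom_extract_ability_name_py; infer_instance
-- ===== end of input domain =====

-- B replaces A's split/strip line loop by a single in-place scan of the raw text
-- (skip whitespace, keyword test and name slice at each line start): alternative
-- decomposition, no per-line copies; return values proved equal on the domain.

-- ===== PORT A =====

-- port of Python's  s.rstrip("{")  (shared primitive, used by both sources)
def pvRstripBrace (x : List Char) : List Char :=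
  (x.reverse.dropWhile (fun c => c == '{')).reverse

-- body of A's loop for one line: `some r` = the `return`, `none` = fall through
def pvStepA (line : List Char) : Option (List Char) :=
  let l := PySem.Chars.strip line
  if PySem.Chars.startswith l "ability ".toList || PySem.Chars.startswith l "passive ".toList then
    let parts := PySem.Chars.split₀ l
    if 2 ≤ parts.length then
      some (PySem.Chars.strip (pvRstripBrace (parts.getD 1 [])))
    else none
  else none

def pvLoopA : List (List Char) → Option (List Char)
  | [] => none
  | line :: rest =>
    match pvStepA line with
    | some r => some r
    | none => pvLoopA rest

def extract_ability_name_py (text : String) : Option String :=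
  (pvLoopA (PySem.Chars.splitOn text.toList "\n".toList)).map String.ofList

-- ===== PORT B =====

-- Source B's `c in WS`: whitespace other than newline (exact on the ASCII domain,
-- where Source B's WS constant is exactly Python whitespace minus '\n')
def pvNlWS (c : Char) : Bool := PySem.Chars.isspace c && !(c == '\n')

-- one attempt of Source B's matcher at a line start (loop body before the line advance);
-- the suffix of the text from the line start stands for Source B's index i
def pvTryB (cs : List Char) : Option (List Char) :=
  let t := cs.dropWhile pvNlWS
  if PySem.Chars.startswith t "ability ".toList || PySem.Chars.startswith t "passive ".toList then
    let tok := ((t.drop 8).dropWhile pvNlWS).takeWhile (fun c => !(PySem.Chars.isspace c))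
    if tok.isEmpty then none else some (pvRstripBrace tok)
  else none

-- Source B's outer while loop: try at this line start, else advance past the next '\n'
def pvScanB (cs : List Char) : Option (List Char) :=
  match pvTryB cs with
  | some r => some r
  | none =>
    match h : cs.dropWhile (fun c => !(c == '\n')) with
    | [] => none
    | _ :: rest => pvScanB rest
termination_by cs.length
decreasing_by
  have hle := List.length_dropWhile_le (fun c => !(c == '\n')) cs
  rw [h] at hle
  simp at hle; omega

def extract_ability_name_py_alt (text : String) : Option String :=
  (pvScanB text.toList).map String.ofList

-- ===== PRECONDITION & SPEC =====
def Spec_extract_ability_name_py (text : String) (out : Option String) : Prop := out = extract_ability_name_py_alt text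
instance (text : String) (out : Option String) : Decidable (Spec_extract_ability_name_py text out) := by unfold Spec_extract_ability_name_py; infer_instance

-- ===== CLAIM (what is proved, stated in full; the proofs are below) =====
def Claim_equal_extract_ability_name_py : Prop := ∀ (text : String), Dom_extract_ability_name_py text → Spec_extract_ability_name_py text (extract_ability_name_py text)

-- ===== LEMMAS AND PROOFS =====

-- ---------- proof-side helpers ----------

-- prepend chars to the first element of a list of lines
def pvModHead (p : List Char) : List (List Char) → List (List Char)
  | [] => [p]
  | x :: xs => (p ++ x) :: xs

-- the lines of a text (split at '\n')
def pvLines : List Char → List (List Char)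
  | [] => [[]]
  | c :: rest => if c = '\n' then [] :: pvLines rest else pvModHead [c] (pvLines rest)

-- the whitespace-separated words of a text (what Python's str.split() returns)
def pvWords : List Char → List (List Char)
  | [] => []
  | c :: rest =>
    if PySem.Chars.isspace c then pvWords rest
    else (c :: rest.takeWhile (fun c => !(PySem.Chars.isspace c))) ::
      pvWords (rest.dropWhile (fun c => !(PySem.Chars.isspace c)))
termination_by l => l.length
decreasing_by
  all_goals
    (have := List.length_dropWhile_le (fun c => !(PySem.Chars.isspace c)) rest;
     simp only [List.length_cons]; omega)

-- ---------- generic takeWhile/dropWhile facts not in the library ----------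

theorem pv_dropWhile_congr {p q : Char → Bool} :
    ∀ {l : List Char}, (∀ c ∈ l, p c = q c) → l.dropWhile p = l.dropWhile q := by
  intro l
  induction l with
  | nil => intro _; rfl
  | cons c rest ih =>
    intro h
    have hc := h c (by simp)
    by_cases hp : p c
    · rw [List.dropWhile_cons_of_pos hp, List.dropWhile_cons_of_pos (hc ▸ hp)]
      exact ih (fun x hx => h x (by simp [hx]))
    · rw [List.dropWhile_cons_of_neg hp, List.dropWhile_cons_of_neg (hc ▸ hp)]

theorem pv_dropWhile_of_all_neg {p : Char → Bool} :
    ∀ {l : List Char}, (∀ c ∈ l, p c = false) → l.dropWhile p = l := by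
  intro l
  induction l with
  | nil => intro _; rfl
  | cons c rest _ =>
    intro h
    rw [List.dropWhile_cons_of_neg (by simp [h c (by simp)])]

theorem pv_takeWhile_all_append {p : Char → Bool} {a : List Char} (b : List Char)
    (h : ∀ c ∈ a, p c = true) : (a ++ b).takeWhile p = a ++ b.takeWhile p := by
  induction a with
  | nil => rfl
  | cons c a' ih =>
    rw [List.cons_append, List.takeWhile_cons_of_pos (h c (by simp)), List.cons_append,
      ih (fun x hx => h x (by simp [hx]))]

theorem pv_dropWhile_all_append {p : Char → Bool} {a : List Char} (b : List Char)
    (h : ∀ c ∈ a, p c = true) : (a ++ b).dropWhile p = b.dropWhile p := by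
  induction a with
  | nil => rfl
  | cons c a' ih =>
    rw [List.cons_append, List.dropWhile_cons_of_pos (h c (by simp)),
      ih (fun x hx => h x (by simp [hx]))]

-- ---------- rstrip / strip facts ----------

theorem pv_rstrip_prefix (x : List Char) : PySem.Chars.rstrip x <+: x := by
  have h : (x.reverse.dropWhile PySem.Chars.isspace).reverse <+: x.reverse.reverse :=
    List.reverse_prefix.mpr (List.dropWhile_suffix _)
  simpa [PySem.Chars.rstrip] using h

theorem pv_rstrip_app_ws {u : List Char} (x : List Char)
    (h : ∀ c ∈ u, PySem.Chars.isspace c = true) :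
    PySem.Chars.rstrip (x ++ u) = PySem.Chars.rstrip x := by
  unfold PySem.Chars.rstrip
  rw [List.reverse_append, pv_dropWhile_all_append _ (by intro c hc; exact h c (by simpa using hc))]

theorem pv_rstrip_app_keep {u : List Char} (x : List Char) {d : Char} (hd : d ∈ u)
    (hws : PySem.Chars.isspace d = false) :
    PySem.Chars.rstrip (x ++ u) = x ++ PySem.Chars.rstrip u := by
  unfold PySem.Chars.rstrip
  rw [List.reverse_append, List.dropWhile_append]
  have hne : u.reverse.dropWhile PySem.Chars.isspace ≠ [] := by
    intro hnil
    have := (List.dropWhile_eq_nil_iff).mp hnil d (by simpa using hd)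
    simp [hws] at this
  rw [if_neg (by simpa [List.isEmpty_iff] using hne)]
  simp

theorem pv_rstrip_of_all_not_ws {x : List Char} (h : ∀ c ∈ x, PySem.Chars.isspace c = false) :
    PySem.Chars.rstrip x = x := by
  unfold PySem.Chars.rstrip
  rw [pv_dropWhile_of_all_neg (by intro c hc; exact h c (by simpa using hc)), List.reverse_reverse]

theorem pv_strip_of_all_not_ws {x : List Char} (h : ∀ c ∈ x, PySem.Chars.isspace c = false) :
    PySem.Chars.strip x = x := by
  unfold PySem.Chars.strip PySem.Chars.lstrip
  rw [pv_dropWhile_of_all_neg h, pv_rstrip_of_all_not_ws h]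

-- rstrip never changes the first whitespace-free word
theorem pv_takeWhile_rstrip (x : List Char) :
    (PySem.Chars.rstrip x).takeWhile (fun c => !(PySem.Chars.isspace c)) =
      x.takeWhile (fun c => !(PySem.Chars.isspace c)) := by
  have hx : x = PySem.Chars.rstrip x ++ (x.reverse.takeWhile PySem.Chars.isspace).reverse := by
    have h := List.takeWhile_append_dropWhile (p := PySem.Chars.isspace) (l := x.reverse)
    unfold PySem.Chars.rstrip
    conv_lhs => rw [← List.reverse_reverse x, ← h]
    rw [List.reverse_append]
  conv_rhs => rw [hx]
  rw [List.takeWhile_append]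
  split_ifs with hlen
  · have hfull : (PySem.Chars.rstrip x).takeWhile (fun c => !(PySem.Chars.isspace c)) =
        PySem.Chars.rstrip x :=
      (List.takeWhile_prefix _).eq_of_length hlen
    rw [hfull]
    have : (x.reverse.takeWhile PySem.Chars.isspace).reverse.takeWhile
        (fun c => !(PySem.Chars.isspace c)) = [] := by
      cases hh : (x.reverse.takeWhile PySem.Chars.isspace).reverse with
      | nil => rfl
      | cons e y =>
        have he : PySem.Chars.isspace e = true := by
          have : e ∈ x.reverse.takeWhile PySem.Chars.isspace := by
            have : e ∈ (x.reverse.takeWhile PySem.Chars.isspace).reverse := by simp [hh]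
            simpa using this
          exact List.mem_takeWhile_imp this
        rw [List.takeWhile_cons_of_neg (by simp [he])]
    rw [this, List.append_nil]
  · rfl

theorem pv_mem_rstripBrace {x : List Char} {c : Char} (h : c ∈ pvRstripBrace x) : c ∈ x := by
  unfold pvRstripBrace at h
  have := (List.dropWhile_sublist (l := x.reverse) (p := fun c => c == '{')).mem
    (by simpa using h)
  simpa using this

-- ---------- split₀ = pvWords ----------

theorem pv_go_split : ∀ (l cur : List Char) (acc : List (List Char)),
    PySem.Chars.split₀.go l cur acc =
      acc.reverse ++ (if cur.isEmpty then pvWords l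
        else (cur.reverse ++ l.takeWhile (fun c => !(PySem.Chars.isspace c))) ::
          pvWords (l.dropWhile (fun c => !(PySem.Chars.isspace c)))) := by
  intro l
  induction l with
  | nil =>
    intro cur acc
    cases cur <;> simp [PySem.Chars.split₀.go, pvWords]
  | cons c rest ih =>
    intro cur acc
    by_cases hws : PySem.Chars.isspace c
    · cases cur with
      | nil =>
        simp only [PySem.Chars.split₀.go, hws, if_true, List.isEmpty_nil]
        rw [ih [] acc]
        simp [pvWords, hws]
      | cons c0 cur' =>
        simp only [PySem.Chars.split₀.go, hws, if_true, List.isEmpty_cons]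
        rw [ih [] (((c0 :: cur').reverse) :: acc)]
        simp [pvWords, hws]
    · simp only [PySem.Chars.split₀.go, hws, if_false, Bool.false_eq_true]
      rw [ih (c :: cur) acc]
      cases cur <;> simp [pvWords, hws]

theorem pv_split0_eq (l : List Char) : PySem.Chars.split₀ l = pvWords l := by
  unfold PySem.Chars.split₀
  rw [pv_go_split]
  simp

-- ---------- pvWords decomposition facts ----------

theorem pv_words_ws_append {a : List Char} (z : List Char)
    (h : ∀ c ∈ a, PySem.Chars.isspace c = true) : pvWords (a ++ z) = pvWords z := by
  induction a with
  | nil => rfl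
  | cons c a' ih =>
    rw [List.cons_append]
    have h1 : pvWords (c :: (a' ++ z)) = pvWords (a' ++ z) := by
      simp [pvWords, h c (by simp)]
    rw [h1]
    exact ih (fun x hx => h x (by simp [hx]))

theorem pv_words_word_ws {w : List Char} (z : List Char) (hne : w ≠ [])
    (hall : ∀ c ∈ w, PySem.Chars.isspace c = false) :
    pvWords (w ++ ' ' :: z) = w :: pvWords z := by
  cases w with
  | nil => exact absurd rfl hne
  | cons d w' =>
    rw [List.cons_append]
    have h1 : pvWords (d :: (w' ++ ' ' :: z)) =
        (d :: (w' ++ ' ' :: z).takeWhile (fun c => !(PySem.Chars.isspace c))) ::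
          pvWords ((w' ++ ' ' :: z).dropWhile (fun c => !(PySem.Chars.isspace c))) := by
      simp [pvWords, hall d (by simp)]
    rw [h1, pv_takeWhile_all_append _ (by intro c hc; simp [hall c (by simp [hc])]),
      pv_dropWhile_all_append _ (by intro c hc; simp [hall c (by simp [hc])])]
    have h2 : (' ' :: z).takeWhile (fun c => !(PySem.Chars.isspace c)) = [] := by
      rw [List.takeWhile_cons, if_neg (by decide)]
    have h3 : (' ' :: z).dropWhile (fun c => !(PySem.Chars.isspace c)) = ' ' :: z := by
      rw [List.dropWhile_cons, if_neg (by decide)]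
    have h4 : pvWords (' ' :: z) = pvWords z := by
      simp [pvWords, (by decide : PySem.Chars.isspace ' ' = true)]
    rw [h2, h3, h4, List.append_nil]

-- ---------- the per-line equivalence ----------

theorem pv_nlws_eq_ws {l : List Char} (h : '\n' ∉ l) :
    l.dropWhile pvNlWS = l.dropWhile PySem.Chars.isspace := by
  apply pv_dropWhile_congr
  intro c hc
  have : ¬ (c = '\n') := fun he => h (he ▸ hc)
  simp [pvNlWS, this]

-- one keyword matched at the head of the stripped line: both compute the same
set_option maxRecDepth 10000 in
theorem pv_line_kw (kw : List Char)
    (hkw : kw = "ability ".toList ∨ kw = "passive ".toList) (l : List Char)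
    (hnl : '\n' ∉ l)
    (hpre : kw.isPrefixOf (l.dropWhile PySem.Chars.isspace) = true) :
    pvTryB l = pvStepA l := by
  obtain ⟨w, hkww, hwne, hwall, hw7⟩ :
      ∃ w, kw = w ++ [' '] ∧ w ≠ [] ∧ (∀ c ∈ w, PySem.Chars.isspace c = false) ∧ w.length = 7 := by
    rcases hkw with h | h <;> subst h
    · exact ⟨['a','b','i','l','i','t','y'], rfl, by decide,
        by intro c hc; fin_cases hc <;> rfl, by decide⟩
    · exact ⟨['p','a','s','s','i','v','e'], rfl, by decide,
        by intro c hc; fin_cases hc <;> rfl, by decide⟩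
  have hkw8 : kw.length = 8 := by rcases hkw with h | h <;> subst h <;> rfl
  set t := l.dropWhile PySem.Chars.isspace with ht
  have hnt : '\n' ∉ t := fun hm => hnl ((List.dropWhile_sublist _).mem hm)
  obtain ⟨u, hu⟩ : ∃ u, t = kw ++ u := by
    obtain ⟨u, hu⟩ := List.isPrefixOf_iff_prefix.mp hpre
    exact ⟨u, hu.symm⟩
  have hnu : '\n' ∉ u := fun hm => hnt (by simp [hu, hm])
  have hdrop8 : t.drop 8 = u := by rw [hu, ← hkw8, List.drop_left]
  -- B's side: reduce to the token after the keyword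
  have hBt : l.dropWhile pvNlWS = t := by
    rw [pv_nlws_eq_ws hnl]
  have hBu : u.dropWhile pvNlWS = u.dropWhile PySem.Chars.isspace := pv_nlws_eq_ws hnu
  set u₀ := u.dropWhile PySem.Chars.isspace with hu₀
  set tok := u₀.takeWhile (fun c => !(PySem.Chars.isspace c)) with htok
  have hBcond : (("ability ".toList.isPrefixOf t || "passive ".toList.isPrefixOf t) = true) := by
    rcases hkw with h | h <;> rw [h] at hpre <;> simp only [Bool.or_eq_true]
    · exact Or.inl hpre
    · exact Or.inr hpre
  have hB : pvTryB l = if tok.isEmpty then none else some (pvRstripBrace tok) := by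
    simp only [pvTryB]
    unfold PySem.Chars.startswith
    rw [hBt, hBcond, if_pos rfl, hdrop8, hBu, ← htok]
  -- A's side
  by_cases hnil : u₀ = []
  · -- nothing but whitespace after the keyword: no second word, A falls through
    have huws : ∀ c ∈ u, PySem.Chars.isspace c = true :=
      List.dropWhile_eq_nil_iff.mp (hu₀ ▸ hnil)
    have hstrip : PySem.Chars.strip l = w := by
      unfold PySem.Chars.strip PySem.Chars.lstrip
      rw [← ht, hu, pv_rstrip_app_ws _ huws, hkww,
        pv_rstrip_app_ws _ (by intro c hc; rw [List.mem_singleton] at hc; subst hc; decide),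
        pv_rstrip_of_all_not_ws hwall]
    have hsw : ∀ kw' : List Char, kw'.length = 8 → PySem.Chars.startswith w kw' = false := by
      intro kw' hlen
      unfold PySem.Chars.startswith
      by_contra hcon
      have hp : kw'.isPrefixOf w = true := by simpa using hcon
      have := (List.isPrefixOf_iff_prefix.mp hp).length_le
      omega
    have hA : pvStepA l = none := by
      simp only [pvStepA, hstrip]
      rw [hsw _ rfl, hsw _ rfl]
      simp
    rw [hA, hB, htok, hnil]
    rfl
  · obtain ⟨d, u₁, hcons⟩ := List.exists_cons_of_ne_nil hnil
    have hud : u.dropWhile PySem.Chars.isspace = d :: u₁ := hu₀.symm.trans hcons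
    have hd : PySem.Chars.isspace d = false := by
      have hne : u.dropWhile PySem.Chars.isspace ≠ [] := by rw [hud]; simp
      have h2 := List.head_dropWhile_not PySem.Chars.isspace (l := u) hne
      have h3 : (u.dropWhile PySem.Chars.isspace).head hne = d := by simp [hud]
      rw [h3] at h2
      exact h2
    have hdmem : d ∈ u := (List.dropWhile_sublist _).mem (by rw [hud]; simp)
    have hstrip : PySem.Chars.strip l = kw ++ PySem.Chars.rstrip u := by
      unfold PySem.Chars.strip PySem.Chars.lstrip
      rw [← ht, hu, pv_rstrip_app_keep _ hdmem hd]
    have htokne : tok = d :: u₁.takeWhile (fun c => !(PySem.Chars.isspace c)) := by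
      rw [htok, hcons, List.takeWhile_cons_of_pos (by simp [hd])]
    have huparts : u = u.takeWhile PySem.Chars.isspace ++ u₀ := by
      rw [hu₀, List.takeWhile_append_dropWhile]
    have hrsu : PySem.Chars.rstrip u =
        u.takeWhile PySem.Chars.isspace ++ PySem.Chars.rstrip u₀ := by
      conv_lhs => rw [huparts]
      exact pv_rstrip_app_keep _ (by rw [hcons]; simp) hd
    have htw0 : (PySem.Chars.rstrip u₀).takeWhile (fun c => !(PySem.Chars.isspace c)) = tok := by
      rw [pv_takeWhile_rstrip, htok]
    obtain ⟨y, hy⟩ : ∃ y, PySem.Chars.rstrip u₀ = d :: y := by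
      cases hr : PySem.Chars.rstrip u₀ with
      | nil => rw [hr, htokne] at htw0; simp at htw0
      | cons e y =>
        rw [hr] at htw0
        by_cases hPe : PySem.Chars.isspace e
        · rw [List.takeWhile_cons_of_neg (by simp [hPe]), htokne] at htw0
          simp at htw0
        · rw [List.takeWhile_cons_of_pos (by simp [hPe]), htokne] at htw0
          rw [List.cons.injEq] at htw0
          exact ⟨y, by rw [htw0.1]⟩
    have htwy : d :: y.takeWhile (fun c => !(PySem.Chars.isspace c)) = tok := by
      rw [hy] at htw0
      rw [List.takeWhile_cons_of_pos (by simp [hd])] at htw0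
      exact htw0
    have hwords : pvWords (PySem.Chars.strip l) = w :: tok ::
        pvWords (y.dropWhile (fun c => !(PySem.Chars.isspace c))) := by
      rw [hstrip, hkww, List.append_assoc, List.singleton_append,
        pv_words_word_ws _ hwne hwall, hrsu,
        pv_words_ws_append _ (fun c hc => List.mem_takeWhile_imp hc), hy]
      have hpw : pvWords (d :: y) =
          (d :: y.takeWhile (fun c => !(PySem.Chars.isspace c))) ::
            pvWords (y.dropWhile (fun c => !(PySem.Chars.isspace c))) := by
        simp [pvWords, hd]
      rw [hpw, htwy]
    have hswA : (PySem.Chars.startswith (PySem.Chars.strip l) "ability ".toList ||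
        PySem.Chars.startswith (PySem.Chars.strip l) "passive ".toList) = true := by
      have hpref : kw.isPrefixOf (PySem.Chars.strip l) = true := by
        rw [hstrip]
        exact List.isPrefixOf_iff_prefix.mpr (List.prefix_append _ _)
      unfold PySem.Chars.startswith
      rcases hkw with h | h <;> rw [h] at hpref <;> simp only [Bool.or_eq_true]
      · exact Or.inl hpref
      · exact Or.inr hpref
    have htokall : ∀ c ∈ tok, PySem.Chars.isspace c = false := by
      intro c hc
      have := List.mem_takeWhile_imp (htok ▸ hc)
      simpa using this
    have hA : pvStepA l = some (pvRstripBrace tok) := by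
      simp only [pvStepA]
      rw [hswA, if_pos rfl, pv_split0_eq, hwords]
      rw [if_pos (by simp)]
      have hget : (w :: tok ::
          pvWords (y.dropWhile (fun c => !(PySem.Chars.isspace c)))).getD 1 [] = tok := rfl
      rw [hget, pv_strip_of_all_not_ws (fun c hc => htokall c (pv_mem_rstripBrace hc))]
    rw [hA, hB, htokne]
    rfl

theorem pv_tryB_eq_stepA (l : List Char) (hnl : '\n' ∉ l) : pvTryB l = pvStepA l := by
  by_cases h1 : "ability ".toList.isPrefixOf (l.dropWhile PySem.Chars.isspace) = true
  · exact pv_line_kw _ (Or.inl rfl) l hnl h1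
  by_cases h2 : "passive ".toList.isPrefixOf (l.dropWhile PySem.Chars.isspace) = true
  · exact pv_line_kw _ (Or.inr rfl) l hnl h2
  -- neither keyword matches: both fall through
  have hsw : ∀ kw : List Char, kw.isPrefixOf (l.dropWhile PySem.Chars.isspace) = false →
      PySem.Chars.startswith (PySem.Chars.strip l) kw = false := by
    intro kw hkw
    unfold PySem.Chars.startswith PySem.Chars.strip PySem.Chars.lstrip
    by_contra hcon
    have hpref : kw <+: PySem.Chars.rstrip (l.dropWhile PySem.Chars.isspace) :=
      List.isPrefixOf_iff_prefix.mp (by simpa using hcon)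
    have : kw.isPrefixOf (l.dropWhile PySem.Chars.isspace) = true :=
      List.isPrefixOf_iff_prefix.mpr (hpref.trans (pv_rstrip_prefix _))
    rw [this] at hkw
    cases hkw
  have hA : pvStepA l = none := by
    simp only [pvStepA]
    rw [hsw _ (eq_false_of_ne_true h1), hsw _ (eq_false_of_ne_true h2)]
    simp
  have hB : pvTryB l = none := by
    simp only [pvTryB]
    unfold PySem.Chars.startswith
    rw [pv_nlws_eq_ws hnl, eq_false_of_ne_true h1, eq_false_of_ne_true h2]
    simp
  rw [hA, hB]

-- ---------- pvTryB only looks at the current line ----------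

theorem pv_dropWhile_nlws_append (l r : List Char) :
    (l ++ '\n' :: r).dropWhile pvNlWS = l.dropWhile pvNlWS ++ '\n' :: r := by
  rw [List.dropWhile_append]
  split_ifs with h
  · rw [List.isEmpty_iff.mp h, List.nil_append,
      List.dropWhile_cons_of_neg (by simp [pvNlWS])]
  · rfl

theorem pv_isPrefixOf_line (r : List Char) :
    ∀ kw : List Char, '\n' ∉ kw → ∀ x : List Char,
      kw.isPrefixOf (x ++ '\n' :: r) = kw.isPrefixOf x := by
  intro kw
  induction kw with
  | nil => intro _ x; rfl
  | cons k kw' ih =>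
    intro hnk x
    cases x with
    | nil =>
      have hk : ¬ (k = '\n') := fun he => hnk (by simp [he])
      simp [List.isPrefixOf, hk]
    | cons a x' =>
      simp only [List.cons_append, List.isPrefixOf]
      rw [ih (fun hm => hnk (by simp [hm])) x']

theorem pv_takeWhile_P_line (v r : List Char) :
    (v ++ '\n' :: r).takeWhile (fun c => !(PySem.Chars.isspace c)) =
      v.takeWhile (fun c => !(PySem.Chars.isspace c)) := by
  rw [List.takeWhile_append]
  split_ifs with h
  · rw [(List.takeWhile_prefix _).eq_of_length h,
      List.takeWhile_cons_of_neg (by decide), List.append_nil]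
  · rfl

theorem pv_tryB_line (l r : List Char) :
    pvTryB (l ++ '\n' :: r) = pvTryB l := by
  simp only [pvTryB]
  unfold PySem.Chars.startswith
  rw [pv_dropWhile_nlws_append l r,
    pv_isPrefixOf_line r _ (by decide), pv_isPrefixOf_line r _ (by decide)]
  by_cases hc : (("ability ".toList.isPrefixOf (l.dropWhile pvNlWS) ||
      "passive ".toList.isPrefixOf (l.dropWhile pvNlWS)) = true)
  · rw [hc, if_pos rfl, if_pos rfl]
    have hlen : 8 ≤ (l.dropWhile pvNlWS).length := by
      rcases Bool.or_eq_true_iff.mp hc with h | h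
      · have hle := (List.isPrefixOf_iff_prefix.mp h).length_le
        have h8 : ("ability ".toList).length = 8 := rfl
        omega
      · have hle := (List.isPrefixOf_iff_prefix.mp h).length_le
        have h8 : ("passive ".toList).length = 8 := rfl
        omega
    rw [List.drop_append_of_le_length hlen, pv_dropWhile_nlws_append _ r, pv_takeWhile_P_line]
  · rw [if_neg hc, if_neg hc]

-- ---------- splitOn "\n" = pvLines ----------

theorem pv_modHead_modHead (p q : List Char) (y : List (List Char)) :
    pvModHead p (pvModHead q y) = pvModHead (p ++ q) y := by
  cases y <;> simp [pvModHead]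

theorem pv_lines_ne_nil (cs : List Char) : pvLines cs ≠ [] := by
  cases cs with
  | nil => simp [pvLines]
  | cons c rest =>
    simp only [pvLines]
    split_ifs
    · simp
    · cases pvLines rest <;> simp [pvModHead]

theorem pv_modHead_nil {y : List (List Char)} (h : y ≠ []) : pvModHead [] y = y := by
  cases y with
  | nil => exact absurd rfl h
  | cons x xs => simp [pvModHead]

theorem pv_go_lines : ∀ (fuel : Nat) (l cur : List Char) (acc : List (List Char)),
    l.length ≤ fuel →
    PySem.Chars.splitOn.go ['\n'] fuel l cur acc =
      acc.reverse ++ pvModHead cur.reverse (pvLines l) := by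
  intro fuel
  induction fuel with
  | zero =>
    intro l cur acc hle
    have : l = [] := by cases l <;> simp_all
    subst this
    simp [PySem.Chars.splitOn.go, pvLines, pvModHead]
  | succ fuel ih =>
    intro l cur acc hle
    cases l with
    | nil => simp [PySem.Chars.splitOn.go, pvLines, pvModHead]
    | cons c rest =>
      by_cases hc : c = '\n'
      · subst hc
        have hstep : PySem.Chars.splitOn.go ['\n'] (fuel+1) ('\n' :: rest) cur acc =
            PySem.Chars.splitOn.go ['\n'] fuel rest [] (cur.reverse :: acc) := by
          simp [PySem.Chars.splitOn.go, List.isPrefixOf]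
        have hlines : pvLines ('\n' :: rest) = [] :: pvLines rest := by simp [pvLines]
        rw [hstep, ih rest [] (cur.reverse :: acc) (by simp at hle; omega), hlines,
          List.reverse_nil, pv_modHead_nil (pv_lines_ne_nil rest)]
        simp [pvModHead]
      · have hstep : PySem.Chars.splitOn.go ['\n'] (fuel+1) (c :: rest) cur acc =
            PySem.Chars.splitOn.go ['\n'] fuel rest (c :: cur) acc := by
          simp [PySem.Chars.splitOn.go, List.isPrefixOf, beq_iff_eq, Ne.symm hc]
        have hlines : pvLines (c :: rest) = pvModHead [c] (pvLines rest) := by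
          simp [pvLines, hc]
        rw [hstep, ih rest (c :: cur) acc (by simp at hle; omega), hlines, pv_modHead_modHead]
        simp

theorem pv_splitOn_eq_pvLines (cs : List Char) :
    PySem.Chars.splitOn cs "\n".toList = pvLines cs := by
  have hsep : "\n".toList = ['\n'] := rfl
  rw [hsep]
  unfold PySem.Chars.splitOn
  rw [pv_go_lines (cs.length + 1) cs [] [] (by omega)]
  simp [pv_modHead_nil (pv_lines_ne_nil cs)]

-- ---------- pvLines decomposition ----------

theorem pv_lines_no_nl {cs : List Char} (h : '\n' ∉ cs) : pvLines cs = [cs] := by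
  induction cs with
  | nil => rfl
  | cons c rest ih =>
    simp only [pvLines]
    rw [if_neg (fun he => h (by simp [he]))]
    rw [ih (fun hm => h (by simp [hm]))]
    simp [pvModHead]

theorem pv_lines_break {l : List Char} (r : List Char) (h : '\n' ∉ l) :
    pvLines (l ++ '\n' :: r) = l :: pvLines r := by
  induction l with
  | nil => simp [pvLines]
  | cons c l' ih =>
    rw [List.cons_append]
    simp only [pvLines]
    rw [if_neg (fun he => h (by simp [he])), ih (fun hm => h (by simp [hm]))]
    simp [pvModHead]

theorem pv_line_decomp {cs : List Char} {e : Char} {rest : List Char}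
    (h : cs.dropWhile (fun c => !(c == '\n')) = e :: rest) :
    cs = cs.takeWhile (fun c => !(c == '\n')) ++ '\n' :: rest ∧
      '\n' ∉ cs.takeWhile (fun c => !(c == '\n')) := by
  have he : e = '\n' := by
    have hne : cs.dropWhile (fun c => !(c == '\n')) ≠ [] := by rw [h]; simp
    have h2 := List.head_dropWhile_not (fun c => !(c == '\n')) (l := cs) hne
    have h3 : (cs.dropWhile (fun c => !(c == '\n'))).head hne = e := by simp [h]
    rw [h3] at h2
    simpa using h2
  constructor
  · have := List.takeWhile_append_dropWhile (p := fun c => !(c == '\n')) (l := cs)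
    rw [h, he] at this
    exact this.symm
  · intro hm
    have := List.mem_takeWhile_imp hm
    simp at this

-- ---------- the main induction ----------

theorem pv_scan_eq_loop (cs : List Char) : pvScanB cs = pvLoopA (pvLines cs) := by
  induction cs using pvScanB.induct with
  | case1 cs r htry =>
    rw [pvScanB, htry]
    cases hd : cs.dropWhile (fun c => !(c == '\n')) with
    | nil =>
      have hnl : '\n' ∉ cs := by
        intro hm
        have := List.dropWhile_eq_nil_iff.mp hd _ hm
        simp at this
      rw [pv_lines_no_nl hnl]
      simp [pvLoopA, ← pv_tryB_eq_stepA _ hnl, htry]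
    | cons e rest =>
      obtain ⟨hdec, hnl⟩ := pv_line_decomp hd
      rw [hdec, pv_lines_break rest hnl]
      have : pvTryB (cs.takeWhile (fun c => !(c == '\n'))) = some r := by
        rw [← pv_tryB_line _ rest, ← hdec, htry]
      simp [pvLoopA, ← pv_tryB_eq_stepA _ hnl, this]
  | case2 cs htry hd =>
    rw [pvScanB, htry, hd]
    have hnl : '\n' ∉ cs := by
      intro hm
      have := List.dropWhile_eq_nil_iff.mp hd _ hm
      simp at this
    rw [pv_lines_no_nl hnl]
    simp [pvLoopA, ← pv_tryB_eq_stepA _ hnl, htry]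
  | case3 cs htry e rest hd ih =>
    rw [pvScanB, htry, hd]
    obtain ⟨hdec, hnl⟩ := pv_line_decomp hd
    rw [hdec, pv_lines_break rest hnl]
    have : pvTryB (cs.takeWhile (fun c => !(c == '\n'))) = none := by
      rw [← pv_tryB_line _ rest, ← hdec, htry]
    simp [pvLoopA, ← pv_tryB_eq_stepA _ hnl, this, ih]

theorem pv_main : ∀ cs : List Char, pvLoopA (PySem.Chars.splitOn cs "\n".toList) = pvScanB cs := by
  intro cs
  rw [pv_splitOn_eq_pvLines, pv_scan_eq_loop]

-- ===== VERDICT (by name: the statement is the Claim_ definition above) =====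
theorem extract_ability_name_py_spec : Claim_equal_extract_ability_name_py := by
  intro text _
  unfold Spec_extract_ability_name_py extract_ability_name_py extract_ability_name_py_alt
  rw [pv_main]
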